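-- pv_equiv track=rewrite | github.com/williamzhao23/stonehenge | stonehenge.py | create_ley_dr
-- ===== SOURCE A (Python) =====
-- from typing import List, Dict
--
-- def create_ley_dr(board_size: int) -> List[List[int]]:
--     """
--     Return ley-lines along the down-right diagonals given a board_size of
--     Stonehenge.
--
--     >>> create_ley_dr(1)
--     [[1], [0, 2]]
--     >>> create_ley_dr(4)
--     [[1, 4, 8, 13], [0, 3, 7, 12, 17], [2, 6, 11, 16], [5, 10, 15], [9, 14]]
--     """
--     # Generate first diagonal
--     ley_dr = [[1]]
--     start = 1
--     for n in range(3, board_size + 2):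
--         ley_dr[0].append(start + n)
--         start += n
--     # Generate heads of other diagonals
--     ley_dr.append([0])
--     start = 0
--     for n in range(2, board_size + 1):
--         ley_dr.append([start + n])
--         start += n
--     # Fill in other diagonals
--     for n in range(1, board_size):
--         start = ley_dr[n][0]
--         for i in range(n + 2, board_size + 2):
--             ley_dr[n].append(start + i)
--             start += i
--         ley_dr[n].append(start + board_size + 1)
--     ley_dr[-1].append(ley_dr[-1][0] + board_size + 1)
--     return ley_dr
-- ===== SOURCE B (Python) =====
-- def create_ley_dr(board_size):
--     n = board_size
--
--     def cell(r, c):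
--         # number of the cell at row r, column c: row r starts at r*(r+3)//2
--         return r * (r + 3) // 2 + c
--
--     first = [cell(i, i + 1) for i in range(n)]
--     return [first] + [[cell(r, r - m) for r in range(m, n)] + [cell(n, n - 1 - m)]
--                       for m in range(n)]
-- ===== Notes on version B (the rewrite author's own statement) =====
-- stated objective: simpler
-- what changed: Replaces A's three running-sum accumulator loops with in-place row mutation by a closed-form cell-number formula cell(r,c)=r*(r+3)//2+c, emitting every diagonal directly by comprehension.
-- outside the precondition, e.g. on create_ley_dr(0): A returns [[1], [0, 1]], B returns [[]]; on create_ley_dr(-2): A returns [[1], [0, -1]], B returns [[]]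
import Mathlib
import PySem

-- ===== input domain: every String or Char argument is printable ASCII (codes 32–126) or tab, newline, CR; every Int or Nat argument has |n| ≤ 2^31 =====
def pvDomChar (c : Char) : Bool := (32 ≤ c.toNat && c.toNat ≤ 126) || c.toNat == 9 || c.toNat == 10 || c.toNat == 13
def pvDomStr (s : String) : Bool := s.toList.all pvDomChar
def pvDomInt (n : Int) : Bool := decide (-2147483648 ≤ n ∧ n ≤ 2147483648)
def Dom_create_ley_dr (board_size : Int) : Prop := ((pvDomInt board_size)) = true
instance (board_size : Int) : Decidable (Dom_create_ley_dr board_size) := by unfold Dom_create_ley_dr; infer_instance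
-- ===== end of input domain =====

-- B replaces A's running-sum accumulator loops (with in-place row mutation) by a closed-form
-- cell-number formula, emitting each diagonal directly; objective: simpler, same cost.

-- ===== PORT A =====
-- body of A's third loop (the fill of ley_dr[n]); 'row.headD 0' transliterates 'ley_dr[n][0]',
-- which Python only ever evaluates on nonempty rows.
def pvBody (board_size n : Int) (row : List Int) : List Int :=
  let s := (PySem.List.pyRange (n + 2) (board_size + 2) 1).foldl
      (fun (st : List Int × Int) i => (st.1 ++ [st.2 + i], st.2 + i)) (row, row.headD 0)
  s.1 ++ [s.2 + board_size + 1]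

def create_ley_dr (board_size : Int) : List (List Int) :=
  let s1 := (PySem.List.pyRange 3 (board_size + 2) 1).foldl
      (fun (st : List Int × Int) n => (st.1 ++ [st.2 + n], st.2 + n)) ([1], 1)
  let s2 := (PySem.List.pyRange 2 (board_size + 1) 1).foldl
      (fun (st : List (List Int) × Int) n => (st.1 ++ [[st.2 + n]], st.2 + n)) ([s1.1, [0]], 0)
  let ley3 := (PySem.List.pyRange 1 board_size 1).foldl
      (fun ley n => ley.set n.toNat (pvBody board_size n (ley.getD n.toNat []))) s2.1
  ley3.dropLast ++ [ley3.getLastD [] ++ [(ley3.getLastD []).headD 0 + board_size + 1]]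

-- ===== PORT B =====
def pvCell (r c : Int) : Int := PySem.Int.floordiv (r * (r + 3)) 2 + c

def create_ley_dr_alt (board_size : Int) : List (List Int) :=
  let first := (PySem.List.pyRange 0 board_size 1).map (fun i => pvCell i (i + 1))
  [first] ++ (PySem.List.pyRange 0 board_size 1).map (fun m =>
    (PySem.List.pyRange m board_size 1).map (fun r => pvCell r (r - m))
      ++ [pvCell board_size (board_size - 1 - m)])

-- ===== PRECONDITION & SPEC =====
-- Pre_ excludes non-positive board sizes, outside the game's natural domain, where A's
-- returned [[1], [0, board_size+1]] is leftover loop-seed state.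
def Pre_create_ley_dr (board_size : Int) : Prop := 1 ≤ board_size
instance (board_size : Int) : Decidable (Pre_create_ley_dr board_size) := by
  unfold Pre_create_ley_dr; infer_instance
def pvWitness_create_ley_dr : Int := 2

def Spec_create_ley_dr (board_size : Int) (out : List (List Int)) : Prop := out = create_ley_dr_alt board_size
instance (board_size : Int) (out : List (List Int)) : Decidable (Spec_create_ley_dr board_size out) := by
  unfold Spec_create_ley_dr; infer_instance

-- ===== CLAIM (what is proved, stated in full; the proofs are below) =====
def Claim_equal_create_ley_dr : Prop := ∀ (board_size : Int), Dom_create_ley_dr board_size → Pre_create_ley_dr board_size → Spec_create_ley_dr board_size (create_ley_dr board_size)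

-- ===== LEMMAS AND PROOFS =====

-- prefix sums of a list starting from seed s, together with the final accumulator
def pvScan (s : Int) : List Int → List Int × Int
  | [] => ([], s)
  | n :: t => let r := pvScan (s + n) t; ((s + n) :: r.1, r.2)

lemma foldl_scan_id (l : List Int) (acc : List Int) (s : Int) :
    l.foldl (fun (st : List Int × Int) n => (st.1 ++ [st.2 + n], st.2 + n)) (acc, s)
      = (acc ++ (pvScan s l).1, (pvScan s l).2) := by
  induction l generalizing acc s with
  | nil => simp [pvScan]
  | cons n t ih => simp [List.foldl_cons, pvScan, ih]

lemma foldl_scan_sing (l : List Int) (acc : List (List Int)) (s : Int) :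
    l.foldl (fun (st : List (List Int) × Int) n => (st.1 ++ [[st.2 + n]], st.2 + n)) (acc, s)
      = (acc ++ (pvScan s l).1.map (fun v => [v]), (pvScan s l).2) := by
  induction l generalizing acc s with
  | nil => simp [pvScan]
  | cons n t ih => simp [List.foldl_cons, pvScan, ih]

lemma pvCell_zero (c : Int) : pvCell 0 c = c := by
  simp [pvCell, PySem.Int.floordiv]

lemma pvCell_succ (r c : Int) : pvCell (r + 1) c = pvCell r c + (r + 2) := by
  simp only [pvCell, PySem.Int.floordiv]
  have h : (r + 1) * (r + 1 + 3) = r * (r + 3) + (r + 2) * 2 := by ring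
  rw [h, Int.add_mul_fdiv_right _ _ (by norm_num)]
  ring

lemma pvCell_shift (r c d : Int) : pvCell r (c + d) = pvCell r c + d := by
  simp only [pvCell]; ring

-- a down-right diagonal walk: at row s the value sits in column c + (s - r)
lemma scan_diag (len : Nat) : ∀ (r c : Int),
    pvScan (pvCell r c) (PySem.List.pyRange (r + 3) (r + 3 + (len : Int)) 1)
      = ((PySem.List.pyRange (r + 1) (r + 1 + (len : Int)) 1).map (fun s => pvCell s (c + s - r)),
         pvCell (r + (len : Int)) (c + (len : Int))) := by
  induction len with
  | zero =>
      intro r c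
      rw [PySem.List.pyRange_one_eq_nil (by omega : r + 3 + ((0 : Nat) : Int) ≤ r + 3),
          PySem.List.pyRange_one_eq_nil (by omega : r + 1 + ((0 : Nat) : Int) ≤ r + 1)]
      simp [pvScan]
  | succ k ih =>
      intro r c
      have hcast : (((k + 1 : Nat)) : Int) = (k : Int) + 1 := by push_cast; ring
      rw [hcast]
      rw [PySem.List.pyRange_one_cons (show r + 3 < r + 3 + ((k : Int) + 1) by omega)]
      rw [PySem.List.pyRange_one_cons (show r + 1 < r + 1 + ((k : Int) + 1) by omega)]
      simp only [pvScan, List.map_cons]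
      have hv : pvCell r c + (r + 3) = pvCell (r + 1) (c + 1) := by
        rw [pvCell_succ r (c + 1), pvCell_shift r c 1]; ring
      rw [hv]
      have e1 : PySem.List.pyRange (r + 3 + 1) (r + 3 + ((k : Int) + 1)) 1
          = PySem.List.pyRange (r + 1 + 3) (r + 1 + 3 + (k : Int)) 1 := by congr 1 <;> ring
      rw [e1, ih (r + 1) (c + 1)]
      refine Prod.ext ?_ ?_
      · show pvCell (r + 1) (c + 1) :: _ = pvCell (r + 1) (c + (r + 1) - r) :: _
        congr 1
        · congr 1; ring
        · have e2 : PySem.List.pyRange (r + 1 + 1) (r + 1 + 1 + (k : Int)) 1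
              = PySem.List.pyRange (r + 1 + 1) (r + 1 + ((k : Int) + 1)) 1 := by congr 1 <;> ring
          rw [e2]
          refine List.map_congr_left ?_
          intro s _
          congr 1; ring
      · show pvCell (r + 1 + (k : Int)) (c + 1 + (k : Int)) = pvCell (r + ((k : Int) + 1)) (c + ((k : Int) + 1))
        congr 1 <;> ring

-- the heads walk: column stays c, row advances
lemma scan_head (len : Nat) : ∀ (r c : Int),
    pvScan (pvCell r c) (PySem.List.pyRange (r + 2) (r + 2 + (len : Int)) 1)
      = ((PySem.List.pyRange (r + 1) (r + 1 + (len : Int)) 1).map (fun s => pvCell s c),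
         pvCell (r + (len : Int)) c) := by
  induction len with
  | zero =>
      intro r c
      rw [PySem.List.pyRange_one_eq_nil (by omega : r + 2 + ((0 : Nat) : Int) ≤ r + 2),
          PySem.List.pyRange_one_eq_nil (by omega : r + 1 + ((0 : Nat) : Int) ≤ r + 1)]
      simp [pvScan]
  | succ k ih =>
      intro r c
      have hcast : (((k + 1 : Nat)) : Int) = (k : Int) + 1 := by push_cast; ring
      rw [hcast]
      rw [PySem.List.pyRange_one_cons (show r + 2 < r + 2 + ((k : Int) + 1) by omega)]
      rw [PySem.List.pyRange_one_cons (show r + 1 < r + 1 + ((k : Int) + 1) by omega)]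
      simp only [pvScan, List.map_cons]
      have hv : pvCell r c + (r + 2) = pvCell (r + 1) c := (pvCell_succ r c).symm
      rw [hv]
      have e1 : PySem.List.pyRange (r + 2 + 1) (r + 2 + ((k : Int) + 1)) 1
          = PySem.List.pyRange (r + 1 + 2) (r + 1 + 2 + (k : Int)) 1 := by congr 1 <;> ring
      rw [e1, ih (r + 1) c]
      refine Prod.ext ?_ ?_
      · show pvCell (r + 1) c :: _ = pvCell (r + 1) c :: _
        congr 1
        have e2 : PySem.List.pyRange (r + 1 + 1) (r + 1 + 1 + (k : Int)) 1
            = PySem.List.pyRange (r + 1 + 1) (r + 1 + ((k : Int) + 1)) 1 := by congr 1 <;> ring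
        rw [e2]
      · show pvCell (r + 1 + (k : Int)) c = pvCell (r + ((k : Int) + 1)) c
        congr 1; ring

-- A's third loop touches each index once, replacing head row m with its filled row
lemma fold_fill (bs : Int) (len : Nat) : ∀ (a : Int) (X W : List (List Int)), 0 ≤ a →
    (X.length : Int) = a + 1 →
    (PySem.List.pyRange (a + 1) (a + 1 + (len : Int)) 1).foldl
        (fun ley n => ley.set n.toNat (pvBody bs n (ley.getD n.toNat [])))
        (X ++ (PySem.List.pyRange a (a + (len : Int)) 1).map (fun m => [pvCell m 0]) ++ W)
      = X ++ (PySem.List.pyRange a (a + (len : Int)) 1).map (fun m => pvBody bs (m + 1) [pvCell m 0]) ++ W := by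
  induction len with
  | zero =>
      intro a X W _ _
      rw [PySem.List.pyRange_one_eq_nil (by omega : a + 1 + ((0 : Nat) : Int) ≤ a + 1),
          PySem.List.pyRange_one_eq_nil (by omega : a + ((0 : Nat) : Int) ≤ a)]
      simp
  | succ k ih =>
      intro a X W ha hX
      have hcast : (((k + 1 : Nat)) : Int) = (k : Int) + 1 := by push_cast; ring
      rw [hcast]
      rw [PySem.List.pyRange_one_cons (show a + 1 < a + 1 + ((k : Int) + 1) by omega)]
      rw [PySem.List.pyRange_one_cons (show a < a + ((k : Int) + 1) by omega)]
      simp only [List.map_cons, List.foldl_cons]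
      have hidx : (a + 1).toNat = X.length := by omega
      have hstate : (X ++ [pvCell a 0] :: List.map (fun m => [pvCell m 0]) (PySem.List.pyRange (a + 1) (a + ((k : Int) + 1)) 1) ++ W).set
            (a + 1).toNat
            (pvBody bs (a + 1)
              ((X ++ [pvCell a 0] :: List.map (fun m => [pvCell m 0]) (PySem.List.pyRange (a + 1) (a + ((k : Int) + 1)) 1) ++ W).getD (a + 1).toNat []))
          = X ++ [pvBody bs (a + 1) [pvCell a 0]]
              ++ List.map (fun m => [pvCell m 0]) (PySem.List.pyRange (a + 1) (a + ((k : Int) + 1)) 1) ++ W := by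
        rw [hidx, List.append_assoc, List.cons_append]
        rw [List.getD_append_right _ _ _ _ (le_refl _)]
        rw [List.set_append]
        simp [List.append_assoc]
      rw [hstate]
      have e1 : PySem.List.pyRange (a + 1 + 1) (a + 1 + ((k : Int) + 1)) 1
          = PySem.List.pyRange (a + 1 + 1) (a + 1 + 1 + (k : Int)) 1 := by congr 1; ring
      have e2 : PySem.List.pyRange (a + 1) (a + ((k : Int) + 1)) 1
          = PySem.List.pyRange (a + 1) (a + 1 + (k : Int)) 1 := by congr 1; ring
      rw [e1, e2]
      rw [ih (a + 1) (X ++ [pvBody bs (a + 1) [pvCell a 0]]) W (by omega) (by simp; omega)]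
      simp [List.append_assoc]

-- A's fill of row m+1 produces exactly B's diagonal m
lemma body_eq (n m : Int) (h0 : 0 ≤ m) (h1 : m + 1 < n) :
    pvBody n (m + 1) [pvCell m 0]
      = (PySem.List.pyRange m n 1).map (fun r => pvCell r (r - m)) ++ [pvCell n (n - 1 - m)] := by
  obtain ⟨len, hlen⟩ : ∃ len : Nat, (len : Int) = n - 1 - m := ⟨(n - 1 - m).toNat, by omega⟩
  simp only [pvBody]
  rw [foldl_scan_id]
  simp only [List.headD_cons]
  have w : pvScan (pvCell m 0) (PySem.List.pyRange (m + 1 + 2) (n + 2) 1)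
      = ((PySem.List.pyRange (m + 1) (m + 1 + (len : Int)) 1).map (fun s => pvCell s (0 + s - m)),
         pvCell (m + (len : Int)) (0 + (len : Int))) := by
    have h := scan_diag len m 0
    have e : PySem.List.pyRange (m + 3) (m + 3 + (len : Int)) 1
        = PySem.List.pyRange (m + 1 + 2) (n + 2) 1 := by congr 1 <;> omega
    rw [e] at h; exact h
  rw [w]
  rw [PySem.List.pyRange_one_cons (show m < n by omega), List.map_cons]
  simp only [List.singleton_append, List.cons_append]
  congr 1
  · congr 1; ring
  congr 1
  · have e1 : PySem.List.pyRange (m + 1) (m + 1 + (len : Int)) 1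
        = PySem.List.pyRange (m + 1) n 1 := by congr 1; omega
    rw [e1]
    refine List.map_congr_left ?_
    intro s _
    congr 1; ring
  · have hs := pvCell_succ (n - 1) (n - 1 - m)
    have e' : n - 1 + 1 = n := by ring
    rw [e'] at hs
    rw [hs]
    have e2 : m + (len : Int) = n - 1 := by omega
    have e3 : (0 : Int) + (len : Int) = n - 1 - m := by omega
    rw [e2, e3]
    ring

-- A in closed form
lemma A_closed (L : Nat) :
    create_ley_dr ((L : Int) + 1)
      = ((PySem.List.pyRange 0 ((L : Int) + 1) 1).map (fun i => pvCell i (i + 1)))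
        :: ((PySem.List.pyRange 0 (L : Int) 1).map (fun m => pvBody ((L : Int) + 1) (m + 1) [pvCell m 0])
            ++ [[pvCell (L : Int) 0, pvCell (L : Int) 0 + ((L : Int) + 1) + 1]]) := by
  simp only [create_ley_dr, foldl_scan_id, foldl_scan_sing]
  -- first diagonal
  have w1 : pvScan 1 (PySem.List.pyRange 3 ((L : Int) + 1 + 2) 1)
      = ((PySem.List.pyRange 1 (1 + (L : Int)) 1).map (fun s => pvCell s (1 + s - 0)),
         pvCell (0 + (L : Int)) (1 + (L : Int))) := by
    have h := scan_diag L 0 1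
    rw [pvCell_zero] at h
    have e : PySem.List.pyRange (0 + 3) (0 + 3 + (L : Int)) 1
        = PySem.List.pyRange 3 ((L : Int) + 1 + 2) 1 := by congr 1 <;> ring
    rw [e] at h; exact h
  -- the heads
  have w2 : pvScan 0 (PySem.List.pyRange 2 ((L : Int) + 1 + 1) 1)
      = ((PySem.List.pyRange 1 (1 + (L : Int)) 1).map (fun s => pvCell s 0),
         pvCell (0 + (L : Int)) 0) := by
    have h := scan_head L 0 0
    rw [pvCell_zero] at h
    have e : PySem.List.pyRange (0 + 2) (0 + 2 + (L : Int)) 1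
        = PySem.List.pyRange 2 ((L : Int) + 1 + 1) 1 := by congr 1 <;> ring
    rw [e] at h; exact h
  rw [w1, w2]
  have first_eq : ([(1 : Int)] ++ (PySem.List.pyRange 1 (1 + (L : Int)) 1).map (fun s => pvCell s (1 + s - 0)))
      = (PySem.List.pyRange 0 ((L : Int) + 1) 1).map (fun i => pvCell i (i + 1)) := by
    rw [PySem.List.pyRange_one_cons (show (0 : Int) < (L : Int) + 1 by omega), List.map_cons]
    rw [pvCell_zero]
    simp only [List.singleton_append, zero_add]
    congr 1
    have e : PySem.List.pyRange 1 (1 + (L : Int)) 1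
        = PySem.List.pyRange 1 ((L : Int) + 1) 1 := by congr 1; ring
    rw [e]
    refine List.map_congr_left ?_
    intro s _
    congr 1; ring
  rw [first_eq]
  -- assemble heads into one map, split off the last head
  have heads_eq : ([(PySem.List.pyRange 0 ((L : Int) + 1) 1).map (fun i => pvCell i (i + 1)), [(0 : Int)]]
        ++ ((PySem.List.pyRange 1 (1 + (L : Int)) 1).map (fun s => pvCell s 0)).map (fun v => [v]))
      = [(PySem.List.pyRange 0 ((L : Int) + 1) 1).map (fun i => pvCell i (i + 1))]
        ++ (PySem.List.pyRange 0 (L : Int) 1).map (fun m => [pvCell m 0]) ++ [[pvCell (L : Int) 0]] := by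
    rw [List.map_map]
    have all : ([(0 : Int)] : List Int) :: (PySem.List.pyRange 1 (1 + (L : Int)) 1).map ((fun v => [v]) ∘ (fun s => pvCell s 0))
        = (PySem.List.pyRange 0 ((L : Int) + 1) 1).map (fun m => [pvCell m 0]) := by
      rw [PySem.List.pyRange_one_cons (show (0 : Int) < (L : Int) + 1 by omega), List.map_cons, pvCell_zero]
      congr 1
      have e : PySem.List.pyRange (0 + 1) ((L : Int) + 1) 1
          = PySem.List.pyRange 1 (1 + (L : Int)) 1 := by congr 1; ring
      rw [e]
      exact List.map_congr_left (fun s _ => rfl)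
    generalize (PySem.List.pyRange 0 ((L : Int) + 1) 1).map (fun i => pvCell i (i + 1)) = A
    calc ([A, [(0 : Int)]] ++ (PySem.List.pyRange 1 (1 + (L : Int)) 1).map ((fun v => [v]) ∘ (fun s => pvCell s 0)))
        = [A] ++ (([(0 : Int)] : List Int) :: (PySem.List.pyRange 1 (1 + (L : Int)) 1).map ((fun v => [v]) ∘ (fun s => pvCell s 0))) := by simp
      _ = [A] ++ (PySem.List.pyRange 0 ((L : Int) + 1) 1).map (fun m => [pvCell m 0]) := by rw [all]
      _ = [A] ++ (PySem.List.pyRange 0 (L : Int) 1).map (fun m => [pvCell m 0]) ++ [[pvCell (L : Int) 0]] := by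
            rw [PySem.List.pyRange_one_succ_right (show (0 : Int) ≤ (L : Int) by omega), List.map_append]
            simp [List.append_assoc]
  rw [heads_eq]
  -- the fill loop
  have w3 := fold_fill ((L : Int) + 1) L 0
      [((PySem.List.pyRange 0 ((L : Int) + 1) 1).map (fun i => pvCell i (i + 1)))]
      [[pvCell (L : Int) 0]] (by omega) (by simp)
  have e4 : PySem.List.pyRange (0 + 1) (0 + 1 + (L : Int)) 1
      = PySem.List.pyRange 1 ((L : Int) + 1) 1 := by congr 1 <;> ring
  have e5 : PySem.List.pyRange 0 (0 + (L : Int)) 1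
      = PySem.List.pyRange 0 (L : Int) 1 := by congr 1; ring
  rw [e4, e5] at w3
  rw [w3]
  -- the final append to the last diagonal
  rw [List.dropLast_concat, List.getLastD_concat]
  simp [List.append_assoc]

set_option maxRecDepth 8192 in
lemma main_eq (L : Nat) : create_ley_dr ((L : Int) + 1) = create_ley_dr_alt ((L : Int) + 1) := by
  rw [A_closed]
  simp only [create_ley_dr_alt, List.singleton_append]
  congr 1
  rw [PySem.List.pyRange_one_succ_right (show (0 : Int) ≤ (L : Int) by omega), List.map_append]
  congr 1
  · refine List.map_congr_left ?_
    intro m hm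
    rw [PySem.List.mem_pyRange_one] at hm
    exact body_eq ((L : Int) + 1) m hm.1 (by omega)
  · simp only [List.map_cons, List.map_nil, PySem.List.pyRange_one_singleton,
      List.singleton_append]
    rw [show (L : Int) - (L : Int) = 0 by ring,
        show (L : Int) + 1 - 1 - (L : Int) = 0 by ring, pvCell_succ,
        show pvCell (L : Int) 0 + ((L : Int) + 1) + 1 = pvCell (L : Int) 0 + ((L : Int) + 2) by ring]

-- ===== VERDICT (by name: the statement is the Claim_ definition above) =====
theorem create_ley_dr_spec : Claim_equal_create_ley_dr := by
  intro board_size _ hpre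
  unfold Pre_create_ley_dr at hpre
  unfold Spec_create_ley_dr
  obtain ⟨L, hL⟩ : ∃ L : Nat, board_size = (L : Int) + 1 := ⟨(board_size - 1).toNat, by omega⟩
  subst hL
  exact main_eq L
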